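-- pv_equiv track=rewrite | github.com/bongjoonno/Machine-Learn | naive_bayes.py | naive_bayes_prep
-- ===== SOURCE A (Python) =====
-- def naive_bayes_prep(class_labels, texts_by_class):
--   word_counts_by_class = {label: {} for label in class_labels}
--   vocab_set = set()
--
--   for i, texts in enumerate(texts_by_class):
--     cur_class = class_labels[i]
--     #iterate through each row getting word counts
--     for sentence in texts:
--       words_in_sentence = sentence.lower().split()
--
--       for word in words_in_sentence:
--         word_counts_by_class[cur_class][word] = word_counts_by_class[cur_class].get(word, 0) + 1
--
--         #all unique words
--         vocab_set.add(word)
--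
--   vocab_size  = len(vocab_set)
--
--   total_words_by_class = {cur_class: sum(word_counts.values()) for cur_class, word_counts in word_counts_by_class.items()}
--
--   return word_counts_by_class, total_words_by_class, vocab_size
-- ===== SOURCE B (Python) =====
-- def naive_bayes_prep(class_labels, texts_by_class):
--   # Stage 1: gather each class's lowered words into one flat list per label.
--   words_by_label = {label: [] for label in class_labels}
--   for i, texts in enumerate(texts_by_class):
--     ws = words_by_label[class_labels[i]]
--     for sentence in texts:
--       ws.extend(sentence.lower().split())
--
--   # Stage 2: count by scanning — each class's dict maps its distinct words
--   # (first-occurrence order) to list.count; totals are just list lengths.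
--   word_counts_by_class = {}
--   vocab = set()
--   for label, ws in words_by_label.items():
--     distinct = list(dict.fromkeys(ws))
--     vocab.update(distinct)
--     word_counts_by_class[label] = {w: ws.count(w) for w in distinct}
--
--   total_words_by_class = {label: len(ws) for label, ws in words_by_label.items()}
--   return word_counts_by_class, total_words_by_class, len(vocab)
-- ===== Notes on version B (the rewrite author's own statement) =====
-- stated objective: alternative
-- what changed: B replaces A's single pass of incremental dict counting with two staged passes: it first flattens each class's sentences into one word list, then counts each distinct word (dict.fromkeys order) with list.count, gets totals as plain list lengths, and the vocabulary as the union of the per-class distinct-word lists; it trades the O(n) increment loop for O(n*distinct) scanning.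
import Mathlib
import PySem

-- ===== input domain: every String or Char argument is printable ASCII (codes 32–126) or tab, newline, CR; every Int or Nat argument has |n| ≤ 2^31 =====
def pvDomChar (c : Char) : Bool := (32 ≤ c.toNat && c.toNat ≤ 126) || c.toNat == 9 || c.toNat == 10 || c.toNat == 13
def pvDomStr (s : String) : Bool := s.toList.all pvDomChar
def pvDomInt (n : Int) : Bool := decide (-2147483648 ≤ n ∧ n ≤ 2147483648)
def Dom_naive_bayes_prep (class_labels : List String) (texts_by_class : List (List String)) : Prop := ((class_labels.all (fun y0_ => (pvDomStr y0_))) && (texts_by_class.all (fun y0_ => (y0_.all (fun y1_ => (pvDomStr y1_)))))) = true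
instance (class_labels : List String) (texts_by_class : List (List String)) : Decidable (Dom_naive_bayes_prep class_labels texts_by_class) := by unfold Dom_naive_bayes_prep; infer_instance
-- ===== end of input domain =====

-- B counts in two staged passes instead of A's single incremental pass: it first flattens
-- each class's sentences into one word list, then counts each distinct word by scanning
-- (list.count), takes totals as list lengths, and the vocabulary as the union of the
-- per-class distinct-word lists (objective: alternative; equal return value under Pre_).

-- ===== PORT A =====
def naive_bayes_prep (class_labels : List String) (texts_by_class : List (List String)) : (List (String × List (String × Int))) × (List (String × Int)) × Int :=
  -- word_counts_by_class = {label: {} for label in class_labels}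
  let wc0 : PySem.Dict String (PySem.Dict String Int) :=
    class_labels.foldl (fun d label => d.insert label PySem.Dict.empty) PySem.Dict.empty
  -- for i, texts in enumerate(texts_by_class): … ; state = (word_counts_by_class, vocab_set)
  let st :=
    (PySem.List.enumerate texts_by_class).foldl
      (fun st p =>
        -- cur_class = class_labels[i]; pyGetD is exact under Pre_ (index in range);
        -- word_counts_by_class[cur_class] lookup via getD is exact: cur_class is always a key then
        let cur := PySem.List.pyGetD class_labels p.1 ""
        p.2.foldl
          (fun st sentence =>
            (PySem.Str.split₀ (PySem.Str.lower sentence)).foldl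
              (fun st word =>
                (st.1.insert cur ((st.1.getD cur PySem.Dict.empty).modify word 0 (· + 1)),
                 PySem.Set.add st.2 word))
              st)
          st)
      (wc0, (PySem.Set.empty : PySem.Set String))
  let vocab_size : Int := PySem.Set.len st.2
  let total_words_by_class := st.1.items.map (fun p => (p.1, p.2.values.sum))
  (st.1.items.map (fun p => (p.1, p.2.items)), total_words_by_class, vocab_size)

-- ===== PORT B =====
def naive_bayes_prep_alt (class_labels : List String) (texts_by_class : List (List String)) : (List (String × List (String × Int))) × (List (String × Int)) × Int :=
  -- stage 1: words_by_label = {label: [] for label in class_labels}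
  let wl0 : PySem.Dict String (List String) :=
    class_labels.foldl (fun d label => d.insert label []) PySem.Dict.empty
  -- for i, texts in enumerate(texts_by_class): ws = words_by_label[class_labels[i]]; ws.extend(…)
  -- (pyGetD is exact under Pre_: index in range; in-place list extension = overwrite-in-place insert)
  let wl :=
    (PySem.List.enumerate texts_by_class).foldl
      (fun d p =>
        let label := PySem.List.pyGetD class_labels p.1 ""
        d.insert label
          (p.2.foldl (fun ws s => ws ++ PySem.Str.split₀ (PySem.Str.lower s)) (d.getD label [])))
      wl0
  -- stage 2: for label, ws in words_by_label.items():
  --   distinct = list(dict.fromkeys(ws)); vocab.update(distinct); counts = {w: ws.count(w) for w in distinct}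
  let st :=
    wl.items.foldl
      (fun (acc : PySem.Dict String (PySem.Dict String Int) × PySem.Set String) q =>
        let distinct := PySem.List.dedup q.2
        (acc.1.insert q.1 (distinct.foldl (fun c w => c.insert w ((q.2.count w : Int))) PySem.Dict.empty),
         PySem.Set.update acc.2 distinct))
      (PySem.Dict.empty, (PySem.Set.empty : PySem.Set String))
  -- total_words_by_class = {label: len(ws) …}
  let total_words_by_class := wl.items.map (fun q => (q.1, (q.2.length : Int)))
  (st.1.items.map (fun q => (q.1, q.2.items)), total_words_by_class, PySem.Set.len st.2)

-- ===== PRECONDITION & SPEC =====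
-- Pre_ excludes exactly the inputs where A raises IndexError (class_labels[i] out of range);
-- B raises KeyError there too (words_by_label[class_labels[i]]).
def Pre_naive_bayes_prep (class_labels : List String) (texts_by_class : List (List String)) : Prop :=
  texts_by_class.length ≤ class_labels.length
instance (class_labels : List String) (texts_by_class : List (List String)) : Decidable (Pre_naive_bayes_prep class_labels texts_by_class) := by unfold Pre_naive_bayes_prep; infer_instance
def pvWitness_naive_bayes_prep : List String × List (List String) := (["pos", "neg"], [["a B b"], ["b c"]])

def Spec_naive_bayes_prep (class_labels : List String) (texts_by_class : List (List String)) (out : (List (String × List (String × Int))) × (List (String × Int)) × Int) : Prop := out = naive_bayes_prep_alt class_labels texts_by_class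
instance (class_labels : List String) (texts_by_class : List (List String)) (out : (List (String × List (String × Int))) × (List (String × Int)) × Int) : Decidable (Spec_naive_bayes_prep class_labels texts_by_class out) := by unfold Spec_naive_bayes_prep; infer_instance

-- ===== CLAIM (what is proved, stated in full; the proofs are below) =====
def Claim_equal_naive_bayes_prep : Prop := ∀ (class_labels : List String) (texts_by_class : List (List String)), Dom_naive_bayes_prep class_labels texts_by_class → Pre_naive_bayes_prep class_labels texts_by_class → Spec_naive_bayes_prep class_labels texts_by_class (naive_bayes_prep class_labels texts_by_class)

-- ===== LEMMAS AND PROOFS =====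

-- abbreviation used only by the proofs: the words of one sentence
def pvWords (s : String) : List String := PySem.Str.split₀ (PySem.Str.lower s)

-- contains is preserved by insert (helper)
theorem pv_contains_insert {ν : Type} (d : PySem.Dict String ν) (k k' : String) (v : ν)
    (h : d.contains k' = true) : (d.insert k v).contains k' = true := by
  rw [PySem.Dict.contains_eq_decide_mem_keys] at h ⊢
  simp only [decide_eq_true_eq] at h ⊢
  exact (PySem.Dict.mem_keys_insert d k k' v).mpr (Or.inr h)

-- inserting a key's current value back is a no-op (dict ext via keys + getD)
theorem pv_insert_getD_self {ν : Type} (d : PySem.Dict String ν) (k : String) (dflt : ν)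
    (hn : d.keys.Nodup) (hc : d.contains k = true) : d.insert k (d.getD k dflt) = d := by
  have hk : (d.insert k (d.getD k dflt)).keys = d.keys := PySem.Dict.keys_insert_of_contains d _ hc
  apply PySem.Dict.ext
  rw [PySem.Dict.items_eq_map_keys _ (hk ▸ hn) dflt, PySem.Dict.items_eq_map_keys d hn dflt, hk]
  refine List.map_congr_left (fun x _ => ?_)
  rw [PySem.Dict.getD_insert]
  split_ifs with h
  · subst h; rfl
  · rfl

-- word-level loop: A's per-word pair step over a flat word list
theorem pv_words_loop (cur : String) (ws : List String) :
    ∀ (d : PySem.Dict String (PySem.Dict String Int)) (s : PySem.Set String),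
    d.keys.Nodup → d.contains cur = true →
    ws.foldl
      (fun st word =>
        (st.1.insert cur ((st.1.getD cur PySem.Dict.empty).modify word 0 (· + 1)),
         PySem.Set.add st.2 word)) (d, s)
    = (d.insert cur (ws.foldl (fun counts word => counts.modify word 0 (· + 1)) (d.getD cur PySem.Dict.empty)),
       PySem.Set.update s ws) := by
  induction ws with
  | nil =>
    intro d s hn hc
    simp only [List.foldl_nil]
    rw [pv_insert_getD_self d cur PySem.Dict.empty hn hc]
    rfl
  | cons w ws ih =>
    intro d s hn hc
    simp only [List.foldl_cons]
    rw [ih (d.insert cur ((d.getD cur PySem.Dict.empty).modify w 0 (· + 1))) (PySem.Set.add s w)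
        (PySem.Dict.nodup_keys_insert d _ _ hn) (pv_contains_insert d cur cur _ hc)]
    rw [PySem.Dict.getD_insert_self, PySem.Dict.insert_insert_self]
    rfl

-- sentence-level loop for one class = single insert of the accumulated inner count dict
theorem pv_class (cur : String) (texts : List String)
    (d : PySem.Dict String (PySem.Dict String Int)) (s : PySem.Set String)
    (hn : d.keys.Nodup) (hc : d.contains cur = true) :
    texts.foldl
      (fun st sentence =>
        (pvWords sentence).foldl
          (fun st word =>
            (st.1.insert cur ((st.1.getD cur PySem.Dict.empty).modify word 0 (· + 1)),
             PySem.Set.add st.2 word)) st) (d, s)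
    = (d.insert cur
        (texts.foldl
          (fun counts sentence =>
            (pvWords sentence).foldl
              (fun counts word => counts.modify word 0 (· + 1)) counts)
          (d.getD cur PySem.Dict.empty)),
       PySem.Set.update s (texts.flatMap pvWords)) := by
  rw [← List.foldl_flatMap, ← List.foldl_flatMap]
  exact pv_words_loop cur _ d s hn hc

-- class-level loop: A's fold over (label, texts) pairs = (per-label dict fold, accumulated word set)
theorem pv_outer (zl : List (String × List String)) :
    ∀ (d : PySem.Dict String (PySem.Dict String Int)) (s : PySem.Set String),
    d.keys.Nodup → (∀ q ∈ zl, d.contains q.1 = true) →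
    zl.foldl
      (fun st q =>
        q.2.foldl
          (fun st sentence =>
            (pvWords sentence).foldl
              (fun st word =>
                (st.1.insert q.1 ((st.1.getD q.1 PySem.Dict.empty).modify word 0 (· + 1)),
                 PySem.Set.add st.2 word)) st) st) (d, s)
    = (zl.foldl
        (fun d q =>
          d.insert q.1
            (q.2.foldl
              (fun counts sentence =>
                (pvWords sentence).foldl
                  (fun counts word => counts.modify word 0 (· + 1)) counts)
              (d.getD q.1 PySem.Dict.empty))) d,
       PySem.Set.update s (zl.flatMap (fun q => q.2.flatMap pvWords))) := by
  induction zl with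
  | nil => intro d s _ _; rfl
  | cons q zl ih =>
    intro d s hn hq
    simp only [List.foldl_cons]
    rw [pv_class q.1 q.2 d s hn (hq q (List.mem_cons_self ..))]
    rw [ih _ _ (PySem.Dict.nodup_keys_insert d _ _ hn)
        (fun q' hq' => pv_contains_insert d q.1 q'.1 _ (hq q' (List.mem_cons_of_mem _ hq')))]
    simp only [List.flatMap_cons, PySem.Set.update, List.foldl_append]

-- enumerate + index lookup = zip (under the length precondition), A's loop body
theorem pv_enumA (cl : List String) (ts : List (List String)) :
    ∀ (k : Nat) (init : PySem.Dict String (PySem.Dict String Int) × PySem.Set String),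
    ts.length + k ≤ cl.length →
    (PySem.List.enumerate ts (k : Int)).foldl
      (fun st p =>
        p.2.foldl
          (fun st sentence =>
            (pvWords sentence).foldl
              (fun st word =>
                (st.1.insert (PySem.List.pyGetD cl p.1 "")
                   ((st.1.getD (PySem.List.pyGetD cl p.1 "") PySem.Dict.empty).modify word 0 (· + 1)),
                 PySem.Set.add st.2 word)) st) st) init
    = ((cl.drop k).zip ts).foldl
        (fun st q =>
          q.2.foldl
            (fun st sentence =>
              (pvWords sentence).foldl
                (fun st word =>
                  (st.1.insert q.1 ((st.1.getD q.1 PySem.Dict.empty).modify word 0 (· + 1)),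
                   PySem.Set.add st.2 word)) st) st) init := by
  induction ts with
  | nil => intro k init _; simp [PySem.List.enumerate]
  | cons t ts ih =>
    intro k init h
    have hk : k < cl.length := by simp at h; omega
    rw [PySem.List.enumerate_cons]
    rw [List.drop_eq_getElem_cons hk]
    simp only [List.zip_cons_cons, List.foldl_cons]
    have hcast : (k : Int) + 1 = ((k + 1 : Nat) : Int) := by push_cast; ring
    rw [hcast, ih (k + 1) _ (by simp at h ⊢; omega)]
    have hget : PySem.List.pyGetD cl (k : Int) "" = cl[k] := by
      rw [PySem.List.pyGetD_natCast, List.getD_eq_getElem?_getD, List.getElem?_eq_getElem hk]; rfl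
    rw [hget]

-- enumerate + index lookup = zip, B's stage-1 loop body
theorem pv_enumB (cl : List String) (ts : List (List String)) :
    ∀ (k : Nat) (init : PySem.Dict String (List String)),
    ts.length + k ≤ cl.length →
    (PySem.List.enumerate ts (k : Int)).foldl
      (fun d p =>
        d.insert (PySem.List.pyGetD cl p.1 "")
          (p.2.foldl (fun ws s => ws ++ pvWords s) (d.getD (PySem.List.pyGetD cl p.1 "") []))) init
    = ((cl.drop k).zip ts).foldl
        (fun d q => d.insert q.1 (q.2.foldl (fun ws s => ws ++ pvWords s) (d.getD q.1 []))) init := by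
  induction ts with
  | nil => intro k init _; simp [PySem.List.enumerate]
  | cons t ts ih =>
    intro k init h
    have hk : k < cl.length := by simp at h; omega
    rw [PySem.List.enumerate_cons]
    rw [List.drop_eq_getElem_cons hk]
    simp only [List.zip_cons_cons, List.foldl_cons]
    have hcast : (k : Int) + 1 = ((k + 1 : Nat) : Int) := by push_cast; ring
    rw [hcast, ih (k + 1) _ (by simp at h ⊢; omega)]
    have hget : PySem.List.pyGetD cl (k : Int) "" = cl[k] := by
      rw [PySem.List.pyGetD_natCast, List.getD_eq_getElem?_getD, List.getElem?_eq_getElem hk]; rfl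
    rw [hget]

-- nodup of keys through a generic insert fold
theorem pv_nodup_fold {α ν : Type} (f : PySem.Dict String ν → α → ν) (key : α → String) (l : List α) :
    ∀ (d : PySem.Dict String ν), d.keys.Nodup →
    (l.foldl (fun d x => d.insert (key x) (f d x)) d).keys.Nodup := by
  induction l with
  | nil => intro d hn; exact hn
  | cons x l ih => intro d hn; exact ih _ (PySem.Dict.nodup_keys_insert d _ _ hn)

-- every label of cl is a key of the init fold
theorem pv_init_contains {ν : Type} (v0 : ν) (cl : List String) :
    ∀ (d : PySem.Dict String ν) (l : String),
    (l ∈ cl ∨ d.contains l = true) →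
    (cl.foldl (fun d label => d.insert label v0) d).contains l = true := by
  induction cl with
  | nil => intro d l h; exact h.resolve_left (by simp)
  | cons l' cl ih =>
    intro d l h
    simp only [List.foldl_cons]
    rcases h with h | h
    · rcases List.mem_cons.mp h with h | h
      · subst h
        exact ih _ l (Or.inr (by
          rw [PySem.Dict.contains_eq_decide_mem_keys]
          simp [PySem.Dict.mem_keys_insert]))
      · exact ih _ l (Or.inl h)
    · exact ih _ l (Or.inr (pv_contains_insert d l' l _ h))

-- getD of the init fold is the default everywhere
theorem pv_init_getD {ν : Type} (v0 : ν) (cl : List String) :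
    ∀ (d : PySem.Dict String ν),
    (∀ k, d.getD k v0 = v0) →
    ∀ k, (cl.foldl (fun d label => d.insert label v0) d).getD k v0 = v0 := by
  induction cl with
  | nil => intro d h k; exact h k
  | cons l cl ih =>
    intro d h k
    refine ih _ (fun k' => ?_) k
    rw [PySem.Dict.getD_insert]
    split_ifs <;> [rfl; exact h k']

-- keys of an insert fold whose keys are all already present are unchanged
theorem pv_keys_fold {α ν : Type} (f : PySem.Dict String ν → α → ν) (key : α → String) (l : List α) :
    ∀ (d : PySem.Dict String ν), (∀ x ∈ l, d.contains (key x) = true) →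
    (l.foldl (fun d x => d.insert (key x) (f d x)) d).keys = d.keys := by
  induction l with
  | nil => intro d _; rfl
  | cons x l ih =>
    intro d h
    simp only [List.foldl_cons]
    rw [ih _ (fun x' hx' => pv_contains_insert d (key x) (key x') _ (h x' (List.mem_cons_of_mem _ hx')))]
    exact PySem.Dict.keys_insert_of_contains d _ (h x (List.mem_cons_self ..))

-- keys of insert: unchanged if the key is present, appended otherwise
theorem pv_keys_insert {ν : Type} (d : PySem.Dict String ν) (k : String) (v : ν) :
    (d.insert k v).keys = if d.contains k then d.keys else d.keys ++ [k] := by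
  by_cases hc : d.contains k = true
  · rw [if_pos hc]; exact PySem.Dict.keys_insert_of_contains d v hc
  · have hc' : d.contains k = false := by simpa using hc
    rw [hc']
    simp only [PySem.Dict.insert, hc', Bool.false_eq_true, if_false, PySem.Dict.keys]
    simp

-- the two init dicts (wc0 with empty dicts, wl0 with empty lists) are counter-related
theorem pv_base (cl : List String) :
    ∀ (d1 : PySem.Dict String (PySem.Dict String Int)) (d2 : PySem.Dict String (List String)),
    d1.keys = d2.keys → (∀ k, d1.get? k = (d2.get? k).map PySem.Dict.counter) →
    (cl.foldl (fun d label => d.insert label PySem.Dict.empty) d1).keys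
      = (cl.foldl (fun d label => d.insert label []) d2).keys ∧
    ∀ k, (cl.foldl (fun d label => d.insert label PySem.Dict.empty) d1).get? k
      = ((cl.foldl (fun d label => d.insert label []) d2).get? k).map PySem.Dict.counter := by
  induction cl with
  | nil => intro d1 d2 hk hg; exact ⟨hk, hg⟩
  | cons l cl ih =>
    intro d1 d2 hk hg
    simp only [List.foldl_cons]
    refine ih _ _ ?_ ?_
    · have hc : d1.contains l = d2.contains l := by
        rw [PySem.Dict.contains_eq_decide_mem_keys, PySem.Dict.contains_eq_decide_mem_keys, hk]
      rw [pv_keys_insert, pv_keys_insert, hc, hk]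
    · intro k
      by_cases h : k = l
      · subst h
        rw [PySem.Dict.get?_insert_self, PySem.Dict.get?_insert_self]
        rfl
      · rw [PySem.Dict.get?_insert_of_ne _ _ h, PySem.Dict.get?_insert_of_ne _ _ h]
        exact hg k

-- parallel fold: A's per-label counting fold is counter of B's per-label word-list fold
theorem pv_par (zl : List (String × List String)) :
    ∀ (d1 : PySem.Dict String (PySem.Dict String Int)) (d2 : PySem.Dict String (List String)),
    d1.keys = d2.keys →
    (∀ k, d1.get? k = (d2.get? k).map PySem.Dict.counter) →
    (∀ q ∈ zl, d2.contains q.1 = true) →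
    (zl.foldl
        (fun d q =>
          d.insert q.1
            (q.2.foldl
              (fun counts sentence =>
                (pvWords sentence).foldl
                  (fun counts word => counts.modify word 0 (· + 1)) counts)
              (d.getD q.1 PySem.Dict.empty))) d1).keys
      = (zl.foldl
          (fun d q => d.insert q.1 (d.getD q.1 [] ++ q.2.flatMap pvWords)) d2).keys ∧
    ∀ k, (zl.foldl
        (fun d q =>
          d.insert q.1
            (q.2.foldl
              (fun counts sentence =>
                (pvWords sentence).foldl
                  (fun counts word => counts.modify word 0 (· + 1)) counts)
              (d.getD q.1 PySem.Dict.empty))) d1).get? k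
      = ((zl.foldl
          (fun d q => d.insert q.1 (d.getD q.1 [] ++ q.2.flatMap pvWords)) d2).get? k).map PySem.Dict.counter := by
  induction zl with
  | nil => intro d1 d2 hk hg _; exact ⟨hk, hg⟩
  | cons q zl ih =>
    intro d1 d2 hk hg hq
    simp only [List.foldl_cons]
    -- the label's current word list
    have hc2 : d2.contains q.1 = true := hq q (List.mem_cons_self ..)
    obtain ⟨ws0, hws0⟩ : ∃ ws0, d2.get? q.1 = some ws0 := by
      have := PySem.Dict.contains_eq_isSome_get? d2 q.1
      rw [hc2] at this
      exact Option.isSome_iff_exists.mp this.symm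
    have hgd2 : d2.getD q.1 [] = ws0 := by simp [PySem.Dict.getD, hws0]
    have hgd1 : d1.getD q.1 PySem.Dict.empty = PySem.Dict.counter ws0 := by
      simp [PySem.Dict.getD, hg q.1, hws0]
    -- A's inner value is the counter of B's appended word list
    have hval :
        q.2.foldl
          (fun counts sentence =>
            (pvWords sentence).foldl (fun counts word => counts.modify word 0 (· + 1)) counts)
          (d1.getD q.1 PySem.Dict.empty)
        = PySem.Dict.counter (d2.getD q.1 [] ++ q.2.flatMap pvWords) := by
      rw [hgd1, hgd2, ← List.foldl_flatMap]
      show _ = PySem.Dict.counter (ws0 ++ q.2.flatMap pvWords)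
      simp only [PySem.Dict.counter, List.foldl_append]
    rw [hval]
    refine ih _ _ ?_ ?_ (fun q' hq' => pv_contains_insert d2 q.1 q'.1 _ (hq q' (List.mem_cons_of_mem _ hq')))
    · have hc1 : d1.contains q.1 = d2.contains q.1 := by
        rw [PySem.Dict.contains_eq_decide_mem_keys, PySem.Dict.contains_eq_decide_mem_keys, hk]
      rw [pv_keys_insert, pv_keys_insert, hc1, hk]
    · intro k
      by_cases h : k = q.1
      · subst h
        rw [PySem.Dict.get?_insert_self, PySem.Dict.get?_insert_self]
        rfl
      · rw [PySem.Dict.get?_insert_of_ne _ _ h, PySem.Dict.get?_insert_of_ne _ _ h]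
        exact hg k

-- getD membership in B's stage-1 fold: a word is in a label's list iff some pair contributed it
theorem pv_wl_getD (zl : List (String × List String)) :
    ∀ (d : PySem.Dict String (List String)),
    ∀ (k : String) (w : String),
    (w ∈ (zl.foldl (fun d q => d.insert q.1 (d.getD q.1 [] ++ q.2.flatMap pvWords)) d).getD k [] ↔
      w ∈ d.getD k [] ∨ ∃ q ∈ zl, q.1 = k ∧ w ∈ q.2.flatMap pvWords) := by
  induction zl with
  | nil => intro d k w; simp
  | cons q zl ih =>
    intro d k w
    simp only [List.foldl_cons]
    rw [ih]
    by_cases hkq : k = q.1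
    · subst hkq
      rw [PySem.Dict.getD_insert_self]
      simp only [List.mem_append]
      constructor
      · rintro ((h | h) | ⟨q', hq', hk', hw⟩)
        · exact Or.inl h
        · exact Or.inr ⟨q, List.mem_cons_self .., rfl, h⟩
        · exact Or.inr ⟨q', List.mem_cons_of_mem _ hq', hk', hw⟩
      · rintro (h | ⟨q', hq', hk', hw⟩)
        · exact Or.inl (Or.inl h)
        · rcases List.mem_cons.mp hq' with h' | h'
          · subst h'; exact Or.inl (Or.inr hw)
          · exact Or.inr ⟨q', h', hk', hw⟩
    · rw [PySem.Dict.getD_insert_of_ne _ _ _ hkq]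
      constructor
      · rintro (h | ⟨q', hq', hk', hw⟩)
        · exact Or.inl h
        · exact Or.inr ⟨q', List.mem_cons_of_mem _ hq', hk', hw⟩
      · rintro (h | ⟨q', hq', hk', hw⟩)
        · exact Or.inl h
        · rcases List.mem_cons.mp hq' with h' | h'
          · exact absurd (h' ▸ hk') (fun hh => hkq hh.symm)
          · exact Or.inr ⟨q', h', hk', hw⟩

-- fresh inserts from empty: the items are exactly the mapped list
theorem pv_fresh {α ν : Type} (key : α → String) (g : α → ν) (l : List α) :
    ∀ (d : PySem.Dict String ν),
    (l.map key).Nodup → (∀ x ∈ l, d.contains (key x) = false) →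
    (l.foldl (fun d x => d.insert (key x) (g x)) d).items = d.items ++ l.map (fun x => (key x, g x)) := by
  induction l with
  | nil => intro d _ _; simp
  | cons x l ih =>
    intro d hn hfresh
    simp only [List.foldl_cons, List.map_cons]
    have hx : d.contains (key x) = false := hfresh x (List.mem_cons_self ..)
    have hins : (d.insert (key x) (g x)).items = d.items ++ [(key x, g x)] := by
      simp only [PySem.Dict.insert, hx, Bool.false_eq_true, if_false]
    have hn' : key x ∉ List.map key l ∧ (List.map key l).Nodup :=
      List.nodup_cons.mp (by simpa only [List.map_cons] using hn)
    rw [ih _ hn'.2 ?fresh, hins]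
    · simp
    case fresh =>
      intro y hy
      have hne : key y ≠ key x := by
        have := hn'.1
        intro hcontra
        exact this (hcontra ▸ List.mem_map_of_mem hy)
      have hyf : d.contains (key y) = false := hfresh y (List.mem_cons_of_mem _ hy)
      rw [PySem.Dict.contains_eq_decide_mem_keys] at hyf ⊢
      simp only [decide_eq_false_iff_not] at hyf ⊢
      intro hmem
      rcases (PySem.Dict.mem_keys_insert d (key x) (key y) (g x)).mp hmem with h | h
      · exact hne h
      · exact hyf h

-- B's dedup-count dict IS counter
theorem pv_cnt (ws : List String) :
    (PySem.List.dedup ws).foldl (fun c w => c.insert w ((ws.count w : Int))) PySem.Dict.empty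
      = PySem.Dict.counter ws := by
  apply PySem.Dict.ext
  have hfresh := pv_fresh (fun w : String => w) (fun w => ((ws.count w : Int)))
      (PySem.List.dedup ws) PySem.Dict.empty
      (by simp only [List.map_id_fun', id, PySem.List.dedup_eq_ofList]; exact PySem.Set.nodup_ofList ws)
      (fun x _ => rfl)
  rw [hfresh, PySem.Dict.items_counter, PySem.List.dedup_eq_ofList]
  simp [PySem.Dict.empty]

-- sum of per-distinct-word counts is the length
theorem pv_sum (ws : List String) : (PySem.Dict.counter ws).values.sum = (ws.length : Int) := by
  have hv : (PySem.Dict.counter ws).values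
      = (PySem.Set.ofList ws).map (fun k => ((List.count k ws : Nat) : Int)) := by
    simp only [PySem.Dict.values, PySem.Dict.items_counter, List.map_map]
    rfl
  rw [hv]
  have hperm : (PySem.Set.ofList ws).Perm ws.dedup := by
    rw [List.perm_ext_iff_of_nodup (PySem.Set.nodup_ofList ws) ws.nodup_dedup]
    intro w
    rw [PySem.Set.mem_ofList, List.mem_dedup]
  calc ((PySem.Set.ofList ws).map (fun k => ((List.count k ws : Nat) : Int))).sum
      = (ws.dedup.map (fun k => ((List.count k ws : Nat) : Int))).sum :=
        (hperm.map _).sum_eq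
    _ = (((ws.dedup.map (fun k => List.count k ws)).sum : Nat) : Int) := by
        rw [Nat.cast_list_sum, List.map_map]; rfl
    _ = (ws.length : Int) := by rw [List.sum_map_count_dedup_eq_length]

-- membership in B's vocab fold
theorem pv_vmem (l : List (String × List String)) :
    ∀ (s : PySem.Set String) (w : String),
    w ∈ l.foldl (fun s q => PySem.Set.update s (PySem.List.dedup q.2)) s ↔
      w ∈ s ∨ ∃ q ∈ l, w ∈ q.2 := by
  induction l with
  | nil => intro s w; simp
  | cons q l ih =>
    intro s w
    simp only [List.foldl_cons]
    rw [ih, PySem.Set.mem_update, PySem.List.dedup_eq_ofList, PySem.Set.mem_ofList]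
    constructor
    · rintro ((h | h) | ⟨q', hq', hw⟩)
      · exact Or.inl h
      · exact Or.inr ⟨q, List.mem_cons_self .., h⟩
      · exact Or.inr ⟨q', List.mem_cons_of_mem _ hq', hw⟩
    · rintro (h | ⟨q', hq', hw⟩)
      · exact Or.inl (Or.inl h)
      · rcases List.mem_cons.mp hq' with h' | h'
        · subst h'; exact Or.inl (Or.inr hw)
        · exact Or.inr ⟨q', h', hw⟩

theorem pv_vnodup (l : List (String × List String)) :
    ∀ (s : PySem.Set String), s.Nodup →
    (l.foldl (fun s q => PySem.Set.update s (PySem.List.dedup q.2)) s).Nodup := by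
  induction l with
  | nil => intro s hs; exact hs
  | cons q l ih => intro s hs; exact ih _ (PySem.Set.nodup_update s _ hs)

-- the main theorem
theorem pv_main (cl : List String) (ts : List (List String)) (h : ts.length ≤ cl.length) :
    naive_bayes_prep cl ts = naive_bayes_prep_alt cl ts := by
  simp only [naive_bayes_prep, naive_bayes_prep_alt]
  simp only [show ∀ s, PySem.Str.split₀ (PySem.Str.lower s) = pvWords s from fun _ => rfl]
  -- A side / B side stage 1: enumerate+index = zip
  have hA := pv_enumA cl ts 0
    ((cl.foldl (fun d label => d.insert label (PySem.Dict.empty : PySem.Dict String Int)) PySem.Dict.empty),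
     (PySem.Set.empty : PySem.Set String)) (by omega)
  have hB := pv_enumB cl ts 0
    (cl.foldl (fun d label => d.insert label ([] : List String)) PySem.Dict.empty) (by omega)
  simp only [Nat.cast_zero, List.drop_zero] at hA hB
  rw [hA, hB]
  -- B's extend-loop = flatMap
  simp only [PySem.List.foldl_append_eq_flatMap]
  -- B side stage 2: the two accumulators are independent folds
  rw [PySem.List.foldl_prod_mk
      (f := fun (d : PySem.Dict String (PySem.Dict String Int)) (q : String × List String) =>
        d.insert q.1 ((PySem.List.dedup q.2).foldl (fun c w => c.insert w ((q.2.count w : Int))) PySem.Dict.empty))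
      (g := fun (s : PySem.Set String) (q : String × List String) =>
        PySem.Set.update s (PySem.List.dedup q.2))]
  -- shared names
  set zl := cl.zip ts with hzl
  set wc0 := cl.foldl (fun d label => d.insert label (PySem.Dict.empty : PySem.Dict String Int)) PySem.Dict.empty with hwc0
  set wl0 := cl.foldl (fun d label => d.insert label ([] : List String)) PySem.Dict.empty with hwl0
  -- base facts
  have hbase := pv_base cl PySem.Dict.empty PySem.Dict.empty rfl (fun _ => rfl)
  have hwc0n : wc0.keys.Nodup :=
    pv_nodup_fold (fun _ _ => PySem.Dict.empty) (fun x => x) cl PySem.Dict.empty PySem.Dict.nodup_keys_empty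
  have hwl0n : wl0.keys.Nodup :=
    pv_nodup_fold (fun _ _ => ([] : List String)) (fun x => x) cl PySem.Dict.empty PySem.Dict.nodup_keys_empty
  have hzc2 : ∀ q ∈ zl, wl0.contains q.1 = true :=
    fun q hq => pv_init_contains ([] : List String) cl PySem.Dict.empty q.1 (Or.inl (List.of_mem_zip hq).1)
  have hzc1 : ∀ q ∈ zl, wc0.contains q.1 = true :=
    fun q hq => pv_init_contains PySem.Dict.empty cl PySem.Dict.empty q.1 (Or.inl (List.of_mem_zip hq).1)
  -- A's class loop
  rw [pv_outer zl wc0 PySem.Set.empty hwc0n hzc1]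
  -- relation between A's count dict and B's word-list dict
  have hrel := pv_par zl wc0 wl0 hbase.1 hbase.2 hzc2
  set WA := zl.foldl
      (fun d q =>
        d.insert q.1
          (q.2.foldl
            (fun counts sentence =>
              (pvWords sentence).foldl (fun counts word => counts.modify word 0 (· + 1)) counts)
            (d.getD q.1 PySem.Dict.empty))) wc0 with hWA
  set WL := zl.foldl (fun d q => d.insert q.1 (d.getD q.1 [] ++ q.2.flatMap pvWords)) wl0 with hWL
  have hWLkeys : WL.keys = wl0.keys :=
    pv_keys_fold (fun d q => d.getD q.1 [] ++ q.2.flatMap pvWords) (fun q => q.1) zl wl0 hzc2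
  have hWLn : WL.keys.Nodup := hWLkeys ▸ hwl0n
  have hWAn : WA.keys.Nodup := hrel.1 ▸ hWLn
  -- A's count dict has items = WL's items with counter applied to each word list
  have hWAitems : WA.items = WL.items.map (fun q => (q.1, PySem.Dict.counter q.2)) := by
    rw [PySem.Dict.items_eq_map_keys WA hWAn PySem.Dict.empty,
        PySem.Dict.items_eq_map_keys WL hWLn ([] : List String), hrel.1, List.map_map]
    refine List.map_congr_left (fun k hk => ?_)
    obtain ⟨ws, hws⟩ : ∃ ws, WL.get? k = some ws := by
      rcases ho : WL.get? k with _ | ws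
      · exact absurd hk ((PySem.Dict.get?_eq_none_iff_not_mem_keys WL k).mp ho)
      · exact ⟨ws, rfl⟩
    simp [PySem.Dict.getD, hrel.2 k, hws]
  -- B's count dict equals A's
  have hCB : WL.items.foldl
      (fun d q =>
        d.insert q.1 ((PySem.List.dedup q.2).foldl (fun c w => c.insert w ((q.2.count w : Int))) PySem.Dict.empty))
      PySem.Dict.empty = WA := by
    apply PySem.Dict.ext
    have hfresh := pv_fresh (fun q : String × List String => q.1)
        (fun q => (PySem.List.dedup q.2).foldl (fun c w => c.insert w ((q.2.count w : Int))) PySem.Dict.empty)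
        WL.items PySem.Dict.empty (by simpa only [PySem.Dict.keys] using hWLn) (fun _ _ => rfl)
    rw [hfresh, hWAitems,
        show (PySem.Dict.empty : PySem.Dict String (PySem.Dict String Int)).items = [] from rfl,
        List.nil_append]
    exact (List.map_congr_left (fun q _ => by simp only [pv_cnt q.2])).symm
  rw [hCB]
  refine Prod.ext rfl (Prod.ext ?_ ?_)
  -- totals: sum of counts = length of the word list
  · simp only [hWAitems, List.map_map]
    refine List.map_congr_left (fun q _ => ?_)
    simp [pv_sum q.2]
  -- vocabulary size: both sets have the same members, hence the same length
  · rw [show (PySem.Set.empty : PySem.Set String) = [] from rfl]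
    simp only [PySem.Set.update_nil_left]
    have hgetD := pv_wl_getD zl wl0
    have hwl0getD : ∀ k, wl0.getD k [] = [] := pv_init_getD ([] : List String) cl PySem.Dict.empty (fun _ => rfl)
    have hmem : ∀ w, w ∈ WL.items.foldl (fun s q => PySem.Set.update s (PySem.List.dedup q.2)) ([] : PySem.Set String) ↔
        w ∈ zl.flatMap (fun q => q.2.flatMap pvWords) := by
      intro w
      rw [pv_vmem]
      simp only [List.not_mem_nil, false_or, List.mem_flatMap]
      constructor
      · rintro ⟨q, hq, hw⟩
        have hqi : q ∈ WL.keys.map (fun k => (k, WL.getD k [])) := by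
          rwa [← PySem.Dict.items_eq_map_keys WL hWLn ([] : List String)]
        obtain ⟨k, _, rfl⟩ := List.mem_map.mp hqi
        rcases (hgetD k w).mp hw with hw' | ⟨q', hq', _, hw'⟩
        · rw [hwl0getD k] at hw'; exact absurd hw' (List.not_mem_nil)
        · exact ⟨q', hq', List.mem_flatMap.mp hw'⟩
      · rintro ⟨q, hq, hw⟩
        refine ⟨(q.1, WL.getD q.1 []), ?_, ?_⟩
        · rw [PySem.Dict.items_eq_map_keys WL hWLn ([] : List String)]
          refine List.mem_map.mpr ⟨q.1, ?_, rfl⟩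
          rw [hWLkeys]
          have := hzc2 q hq
          rw [PySem.Dict.contains_eq_decide_mem_keys] at this
          simpa using this
        · exact (hgetD q.1 w).mpr (Or.inr ⟨q, hq, rfl, List.mem_flatMap.mpr hw⟩)
    have hperm : (PySem.Set.ofList (zl.flatMap (fun q => q.2.flatMap pvWords)) : List String).Perm
        (WL.items.foldl (fun s q => PySem.Set.update s (PySem.List.dedup q.2)) ([] : PySem.Set String)) := by
      rw [List.perm_ext_iff_of_nodup (PySem.Set.nodup_ofList _)
          (pv_vnodup WL.items ([] : PySem.Set String) List.nodup_nil)]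
      intro w
      rw [PySem.Set.mem_ofList, hmem]
    simp only [PySem.Set.len]
    exact_mod_cast hperm.length_eq

-- ===== VERDICT (by name: the statement is the Claim_ definition above) =====
theorem naive_bayes_prep_spec : Claim_equal_naive_bayes_prep := by
  intro cl ts _ hpre
  exact pv_main cl ts hpre
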